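-- pv_equiv track=rewrite | github.com/rolaechea/ml-traces-analysis | FSELearning/InfluenceFunction.py | _createWellFormedExpression
-- ===== SOURCE A (Python) =====
-- def _createWellFormedExpression(expression):
--     """
--     Adds a whitespace before and after each special character (+,*,[,],....) and replaces each two pair of whitespaces with a single whitespace
--
--     Returns
--     -------
--     A string with all replacements done.
--
--     Notes
--     -----
--     No need for  replaceDifferentLogParts(expression) and replaceLogAndClosingBracket as we don't use logs.
--     """
--     while (expression.find(" ") != -1):
--         expression = expression.replace(" ", "")
--
--     expression = expression.replace("\n", " ")
--     expression = expression.replace("\t", " ")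
--
--     expression = expression.replace("+", " + ")
--     expression = expression.replace("*", " * ")
--
--     expression = expression.replace("(", " ( ")
--     expression = expression.replace(")", " ) ")
--
--     expression = expression.replace("[", " [ ")
--     expression = expression.replace("]", " ] ")
--
--     while (expression.find("  ") != -1):
--         expression = expression.replace("  ", " ")
--
--     return expression
-- ===== SOURCE B (Python) =====
-- def _createWellFormedExpression(expression):
--     # Single left-to-right pass: drop literal spaces, turn '\n'/'\t' into a single
--     # space, pad specials with spaces, collapsing space runs inline via a flag.
--     out = []
--     prev_space = False
--     for ch in expression:
--         if ch == " ":
--             continue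
--         if ch == "\n" or ch == "\t":
--             if not prev_space:
--                 out.append(" ")
--             prev_space = True
--         elif ch in "+*()[]":
--             if not prev_space:
--                 out.append(" ")
--             out.append(ch)
--             out.append(" ")
--             prev_space = True
--         else:
--             out.append(ch)
--             prev_space = False
--     return "".join(out)
-- ===== Notes on version B (the rewrite author's own statement) =====
-- stated objective: alternative
-- what changed: Replaces A's nine whole-string replace passes and two replace-until-fixpoint loops with a single left-to-right scan that drops spaces, maps \n/\t to a space, pads special characters and collapses space runs inline via a last-char-was-space flag; one pass instead of many, though CPython's C-level str.replace makes A faster in wall-clock terms.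
import Mathlib
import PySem

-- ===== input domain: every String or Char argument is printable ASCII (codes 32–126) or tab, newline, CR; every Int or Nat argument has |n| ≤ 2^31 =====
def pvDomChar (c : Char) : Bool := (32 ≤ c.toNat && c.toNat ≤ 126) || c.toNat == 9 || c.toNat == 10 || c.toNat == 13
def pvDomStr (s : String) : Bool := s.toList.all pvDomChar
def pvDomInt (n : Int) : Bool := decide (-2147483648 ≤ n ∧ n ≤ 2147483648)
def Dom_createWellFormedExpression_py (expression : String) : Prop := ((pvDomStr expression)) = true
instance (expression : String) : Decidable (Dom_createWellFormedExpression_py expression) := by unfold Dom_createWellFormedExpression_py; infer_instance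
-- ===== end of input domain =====

-- B replaces A's nine whole-string replace passes plus two replace-until-fixpoint loops by a
-- single left-to-right pass with a 'last emitted char was a space' flag (objective: alternative decomposition).

-- ===== PORT A =====
-- while (expression.find(" ") != -1): expression = expression.replace(" ", "")
-- (fuel = len+1 bounds the while loop: an iteration with the pattern present shortens the string)
def pvLoopRemove : Nat → String → String
  | 0, s => s
  | fuel + 1, s =>
    if PySem.Str.find s " " ≠ -1 then pvLoopRemove fuel (PySem.Str.replace s " " "") else s

def pvLoopCollapse : Nat → String → String
  | 0, s => s
  | fuel + 1, s =>
    if PySem.Str.find s "  " ≠ -1 then pvLoopCollapse fuel (PySem.Str.replace s "  " " ") else s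

def createWellFormedExpression_py (expression : String) : String :=
  let e1 := pvLoopRemove ((PySem.Str.len expression).toNat + 1) expression
  let e2 := PySem.Str.replace e1 "\n" " "
  let e3 := PySem.Str.replace e2 "\t" " "
  let e4 := PySem.Str.replace e3 "+" " + "
  let e5 := PySem.Str.replace e4 "*" " * "
  let e6 := PySem.Str.replace e5 "(" " ( "
  let e7 := PySem.Str.replace e6 ")" " ) "
  let e8 := PySem.Str.replace e7 "[" " [ "
  let e9 := PySem.Str.replace e8 "]" " ] "
  pvLoopCollapse ((PySem.Str.len e9).toNat + 1) e9

-- ===== PORT B =====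
-- the loop of Source B; prev = 'previous emitted char was a space'
def pvBGo : Bool → List Char → List Char
  | _, [] => []
  | prev, c :: t =>
    if c = ' ' then pvBGo prev t
    else if c = '\n' ∨ c = '\t' then (if prev then [] else [' ']) ++ pvBGo true t
    else if c = '+' ∨ c = '*' ∨ c = '(' ∨ c = ')' ∨ c = '[' ∨ c = ']' then
      (if prev then [] else [' ']) ++ c :: ' ' :: pvBGo true t
    else c :: pvBGo false t

def createWellFormedExpression_py_alt (expression : String) : String :=
  String.ofList (pvBGo false expression.toList)

-- ===== PRECONDITION & SPEC =====
def Spec_createWellFormedExpression_py (expression : String) (out : String) : Prop := out = createWellFormedExpression_py_alt expression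
instance (expression : String) (out : String) : Decidable (Spec_createWellFormedExpression_py expression out) := by unfold Spec_createWellFormedExpression_py; infer_instance

-- ===== CLAIM (what is proved, stated in full; the proofs are below) =====
def Claim_equal_createWellFormedExpression_py : Prop := ∀ (expression : String), Dom_createWellFormedExpression_py expression → Spec_createWellFormedExpression_py expression (createWellFormedExpression_py expression)

-- ===== LEMMAS AND PROOFS =====

def pvR2 : List Char → List Char
  | [] => []
  | [c] => [c]
  | c :: d :: t => if c = ' ' ∧ d = ' ' then ' ' :: pvR2 t else c :: pvR2 (d :: t)

def pvSq : Bool → List Char → List Char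
  | _, [] => []
  | b, c :: t => if c = ' ' then (if b then pvSq true t else ' ' :: pvSq true t) else c :: pvSq false t

def pvPad (c : Char) : List Char :=
  if c = '\n' ∨ c = '\t' then [' ']
  else if c = '+' ∨ c = '*' ∨ c = '(' ∨ c = ')' ∨ c = '[' ∨ c = ']' then [' ', c, ' ']
  else [c]

def pvRep (c : Char) (new : List Char) : Char → List Char := fun x => if x = c then new else [x]

theorem go_single (c : Char) (new : List Char) :
    ∀ (fuel : Nat) (l acc : List Char), l.length ≤ fuel →
    PySem.Chars.replace.go [c] new fuel l acc
      = acc.reverse ++ l.flatMap (fun x => if x = c then new else [x]) := by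
  intro fuel
  induction fuel with
  | zero =>
    intro l acc h
    have hl : l = [] := List.eq_nil_of_length_eq_zero (Nat.le_zero.mp h)
    subst hl; simp [PySem.Chars.replace.go]
  | succ n ih =>
    intro l acc h
    cases l with
    | nil => simp [PySem.Chars.replace.go]
    | cons x t =>
      simp only [PySem.Chars.replace.go]
      by_cases hx : x = c
      · subst hx
        simp only [List.isPrefixOf, List.isPrefixOf_cons₂] at *
        rw [if_pos (by simp)]
        rw [ih _ _ (by simpa using Nat.le_of_succ_le_succ h)]
        simp
      · rw [if_neg (by simp [List.isPrefixOf]; exact fun h' => hx h'.symm)]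
        rw [ih _ _ (by simpa using Nat.le_of_succ_le_succ h)]
        simp [hx]

theorem replace_single (s : List Char) (c : Char) (new : List Char) :
    PySem.Chars.replace s [c] new = s.flatMap (fun x => if x = c then new else [x]) := by
  simp [PySem.Chars.replace, go_single c new s.length s [] le_rfl]

theorem go_dd :
    ∀ (fuel : Nat) (l acc : List Char), l.length ≤ fuel →
    PySem.Chars.replace.go [' ', ' '] [' '] fuel l acc = acc.reverse ++ pvR2 l := by
  intro fuel
  induction fuel with
  | zero =>
    intro l acc h
    have hl : l = [] := List.eq_nil_of_length_eq_zero (Nat.le_zero.mp h)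
    subst hl; simp [PySem.Chars.replace.go, pvR2]
  | succ n ih =>
    intro l acc h
    cases l with
    | nil => simp [PySem.Chars.replace.go, pvR2]
    | cons x t =>
      cases t with
      | nil =>
        simp only [PySem.Chars.replace.go]
        rw [if_neg (by simp [List.isPrefixOf])]
        rw [ih _ _ (by simpa using Nat.le_of_succ_le_succ h)]
        simp [pvR2]
      | cons y t' =>
        simp only [PySem.Chars.replace.go]
        by_cases hxy : x = ' ' ∧ y = ' '
        · obtain ⟨hx, hy⟩ := hxy
          subst hx; subst hy
          rw [if_pos (by simp [List.isPrefixOf])]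
          rw [ih _ _ (by simp at h ⊢; omega)]
          simp [pvR2]
        · rw [if_neg (by simp [List.isPrefixOf]; intro h1 h2; exact hxy ⟨h1.symm, h2.symm⟩)]
          rw [ih _ _ (by simp at h ⊢; omega)]
          simp [pvR2, hxy]

theorem replace_dd (s : List Char) :
    PySem.Chars.replace s [' ', ' '] [' '] = pvR2 s := by
  simp [PySem.Chars.replace, go_dd s.length s [] le_rfl]

theorem sq_r2 (b : Bool) (s : List Char) : pvSq b (pvR2 s) = pvSq b s := by
  induction s using pvR2.induct generalizing b with
  | case1 => simp [pvR2]
  | case2 c => simp [pvR2]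
  | case3 c d t hcd ih =>
    obtain ⟨hc, hd⟩ := hcd
    subst hc; subst hd
    cases b <;> simp [pvR2, pvSq, ih]
  | case4 c d t hcd ih =>
    by_cases hc : c = ' '
    · subst hc
      have hd : ¬ d = ' ' := fun h => hcd ⟨rfl, h⟩
      cases b <;> simp [pvR2, pvSq, hd, ih]
    · simp [pvR2, pvSq, hc, hcd, ih]

theorem pvR2_length_le (s : List Char) : (pvR2 s).length ≤ s.length := by
  induction s using pvR2.induct with
  | case1 => simp [pvR2]
  | case2 c => simp [pvR2]
  | case3 c d t hcd ih => simp [pvR2, hcd]; omega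
  | case4 c d t hcd ih => simp [pvR2, hcd] at ih ⊢; omega

theorem r2_length_lt (s : List Char) (h : [' ', ' '] <:+: s) : (pvR2 s).length < s.length := by
  induction s using pvR2.induct with
  | case1 => simp at h
  | case2 c => rcases h with ⟨p, q, hpq⟩; cases p <;> simp_all <;> cases q <;> simp_all
  | case3 c d t hcd ih =>
    simp [pvR2, hcd]
    have := pvR2_length_le t
    omega
  | case4 c d t hcd ih =>
    have h' : [' ', ' '] <:+: (d :: t) := by
      rcases List.infix_cons_iff.mp h with hp | hi
      · exfalso; rcases hp with ⟨q, hq⟩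
        simp at hq
        exact hcd ⟨hq.1.symm, hq.2.1.symm⟩
      · exact hi
    have := ih h'
    simp [pvR2, hcd]
    simpa using this

theorem sq_eq_self (s : List Char) (h : ¬ [' ', ' '] <:+: s) : pvSq false s = s := by
  induction s with
  | nil => simp [pvSq]
  | cons c t ih =>
    have ht : ¬ [' ', ' '] <:+: t := fun hi => h (hi.trans (List.suffix_cons c t).isInfix)
    by_cases hc : c = ' '
    · subst hc
      cases t with
      | nil => simp [pvSq]
      | cons d t' =>
        have hd : ¬ d = ' ' := by
          intro hd; subst hd
          exact h ⟨[], t', by simp⟩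
        have := ih ht
        simp [pvSq, hd] at this ⊢
        exact this
    · simp [pvSq, hc, ih ht]

theorem flatMap_del (c : Char) (s : List Char) :
    s.flatMap (fun x => if x = c then [] else [x]) = s.filter (· ≠ c) := by
  induction s with
  | nil => simp
  | cons x t ih => by_cases hx : x = c <;> simp [hx, ih]

theorem loopRemove_eq (fuel : Nat) (s : String) (h : s.toList.length < fuel) :
    pvLoopRemove fuel s = String.ofList (s.toList.filter (· ≠ ' ')) := by
  cases fuel with
  | zero => omega
  | succ n =>
    simp only [pvLoopRemove]
    by_cases hf : PySem.Chars.find s.toList [' '] = -1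
    · rw [if_neg (by simp [hf])]
      have hni : ¬ ([' '] <:+: s.toList) := (PySem.Chars.find_eq_neg_one_iff _ _).mp hf
      have hmem : ' ' ∉ s.toList := fun hm => hni ((List.singleton_infix_iff ' ' s.toList).mpr hm)
      rw [List.filter_eq_self.mpr (by intro a ha; simp; rintro rfl; exact hmem ha)]
      exact (String.ofList_toList).symm
    · rw [if_pos (by simp [hf])]
      have htl : (PySem.Str.replace s " " "").toList = s.toList.filter (· ≠ ' ') := by
        simp [PySem.Str.toList_replace]
        rw [replace_single]
        have := flatMap_del ' ' s.toList
        simpa using this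
      cases n with
      | zero =>
        exfalso
        have hinf : [' '] <:+: s.toList := (PySem.Chars.find_ne_neg_one_iff _ _).mp hf
        rcases hinf with ⟨p, q, hpq⟩
        rw [← hpq] at h; simp at h
      | succ m =>
        simp only [pvLoopRemove]
        rw [if_neg]
        · exact String.toList_inj.mp (by rw [htl, String.toList_ofList])
        · simp only [ne_eq, not_not]
          have : PySem.Chars.find (PySem.Str.replace s " " "").toList [' '] = -1 := by
            apply (PySem.Chars.find_eq_neg_one_iff _ _).mpr
            rw [htl]
            intro hinf
            have hm : ' ' ∈ s.toList.filter (· ≠ ' ') := (List.singleton_infix_iff ' ' _).mp hinf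
            simp at hm
          simpa using this

theorem loopCollapse_eq (fuel : Nat) (s : String) (h : s.toList.length < fuel) :
    pvLoopCollapse fuel s = String.ofList (pvSq false s.toList) := by
  induction fuel generalizing s with
  | zero => omega
  | succ n ih =>
    simp only [pvLoopCollapse]
    by_cases hf : PySem.Chars.find s.toList [' ', ' '] = -1
    · rw [if_neg (by simp [hf])]
      have hni : ¬ ([' ', ' '] <:+: s.toList) := (PySem.Chars.find_eq_neg_one_iff _ _).mp hf
      rw [sq_eq_self _ hni]
      exact (String.ofList_toList).symm
    · rw [if_pos (by simp [hf])]
      have hinf : [' ', ' '] <:+: s.toList := (PySem.Chars.find_ne_neg_one_iff _ _).mp hf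
      have htl : (PySem.Str.replace s "  " " ").toList = pvR2 s.toList := by
        simp [PySem.Str.toList_replace]
        exact replace_dd s.toList
      rw [ih _ (by rw [htl]; have := r2_length_lt s.toList hinf; omega)]
      rw [htl, sq_r2]

theorem bGo_eq_sq (b : Bool) (s : List Char) :
    pvBGo b s = pvSq b ((s.filter (· ≠ ' ')).flatMap pvPad) := by
  induction s generalizing b with
  | nil => simp [pvBGo, pvSq]
  | cons c t ih =>
    by_cases hsp : c = ' '
    · subst hsp; simp [pvBGo, ih]
    · by_cases hnl : c = '\n' ∨ c = '\t'
      · have hcs : c ≠ ' ' := hsp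
        simp only [pvBGo]
        rw [if_neg hsp, if_pos hnl]
        have hfe : (c::t).filter (· ≠ ' ') = c :: t.filter (· ≠ ' ') := by simp [hsp]
        rw [hfe, List.flatMap_cons]
        simp only [pvPad, if_pos hnl]
        cases b <;> simp [pvSq, ih]
      · by_cases hspec : c = '+' ∨ c = '*' ∨ c = '(' ∨ c = ')' ∨ c = '[' ∨ c = ']'
        · have hcs : ¬ c = ' ' := by rcases hspec with h|h|h|h|h|h <;> subst h <;> decide
          simp only [pvBGo]
          rw [if_neg hsp, if_neg hnl, if_pos hspec]
          have hfe : (c::t).filter (· ≠ ' ') = c :: t.filter (· ≠ ' ') := by simp [hsp]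
          rw [hfe, List.flatMap_cons]
          simp only [pvPad, if_neg hnl, if_pos hspec]
          cases b <;> simp [pvSq, hcs, ih]
        · simp only [pvBGo]
          rw [if_neg hsp, if_neg hnl, if_neg hspec]
          have hfe : (c::t).filter (· ≠ ' ') = c :: t.filter (· ≠ ' ') := by simp [hsp]
          rw [hfe, List.flatMap_cons]
          simp only [pvPad, if_neg hnl, if_neg hspec]
          simp [pvSq, hsp, ih]

theorem cascade (l : List Char) :
    (((((((l.flatMap (pvRep '\n' [' '])).flatMap (pvRep '\t' [' '])).flatMap
      (pvRep '+' [' ', '+', ' '])).flatMap (pvRep '*' [' ', '*', ' '])).flatMap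
      (pvRep '(' [' ', '(', ' '])).flatMap (pvRep ')' [' ', ')', ' '])).flatMap
      (pvRep '[' [' ', '[', ' '])).flatMap (pvRep ']' [' ', ']', ' ']) = l.flatMap pvPad := by
  induction l with
  | nil => simp
  | cons c t ih =>
    simp only [List.flatMap_cons, List.flatMap_append, ih]
    by_cases h1 : c = '\n'; · subst h1; rfl
    by_cases h2 : c = '\t'; · subst h2; rfl
    by_cases h3 : c = '+'; · subst h3; rfl
    by_cases h4 : c = '*'; · subst h4; rfl
    by_cases h5 : c = '('; · subst h5; rfl
    by_cases h6 : c = ')'; · subst h6; rfl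
    by_cases h7 : c = '['; · subst h7; rfl
    by_cases h8 : c = ']'; · subst h8; rfl
    simp [pvRep, pvPad, h1, h2, h3, h4, h5, h6, h7, h8]

theorem cascade_str (s : String) :
    (PySem.Str.replace (PySem.Str.replace (PySem.Str.replace (PySem.Str.replace
      (PySem.Str.replace (PySem.Str.replace (PySem.Str.replace (PySem.Str.replace
        s "\n" " ") "\t" " ") "+" " + ") "*" " * ") "(" " ( ") ")" " ) ") "[" " [ ")
        "]" " ] ").toList = s.toList.flatMap pvPad := by
  simp only [PySem.Str.toList_replace, String.reduceToList]
  rw [replace_single, replace_single, replace_single, replace_single,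
      replace_single, replace_single, replace_single, replace_single]
  rw [← cascade s.toList]
  rfl

theorem len_fuel (s : String) : s.toList.length < (PySem.Str.len s).toNat + 1 := by
  simp [PySem.Str.len_eq]

theorem main_eq (e : String) : createWellFormedExpression_py e = createWellFormedExpression_py_alt e := by
  simp only [createWellFormedExpression_py]
  rw [loopRemove_eq _ _ (len_fuel _)]
  rw [loopCollapse_eq _ _ (len_fuel _)]
  rw [cascade_str, String.toList_ofList]
  simp only [createWellFormedExpression_py_alt]
  rw [bGo_eq_sq]

-- ===== VERDICT (by name: the statement is the Claim_ definition above) =====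
theorem createWellFormedExpression_py_spec : Claim_equal_createWellFormedExpression_py := by
  intro expression _
  unfold Spec_createWellFormedExpression_py
  exact main_eq expression
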